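-- pv_equiv track=rewrite | github.com/WesRoach/coursera | mathematical-thinking-for-computer-science/week3/change.py | change_3_5
-- ===== SOURCE A (Python) =====
-- def change_3_5(amount):
--     assert amount >= 8
--     if amount == 8:
--         return [3, 5]
--     if amount == 9:
--         return [3, 3, 3]
--     if amount == 10:
--         return [5, 5]
--
--     coins = change_3_5(amount - 3)
--     coins.append(3)
--
--     return coins
-- ===== SOURCE B (Python) =====
-- def change_3_5(amount):
--     assert amount >= 8
--     r = amount % 3
--     if r == 2:
--         base, base_amount = [3, 5], 8
--     elif r == 0:
--         base, base_amount = [3, 3, 3], 9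
--     else:
--         base, base_amount = [5, 5], 10
--     return base + [3] * ((amount - base_amount) // 3)
-- ===== Notes on version B (the rewrite author's own statement) =====
-- stated objective: simpler
-- what changed: Replaces the subtract-3 recursion with a closed-form construction: pick the base list from amount % 3 and append the right number of 3s with list multiplication.
import Mathlib
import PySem

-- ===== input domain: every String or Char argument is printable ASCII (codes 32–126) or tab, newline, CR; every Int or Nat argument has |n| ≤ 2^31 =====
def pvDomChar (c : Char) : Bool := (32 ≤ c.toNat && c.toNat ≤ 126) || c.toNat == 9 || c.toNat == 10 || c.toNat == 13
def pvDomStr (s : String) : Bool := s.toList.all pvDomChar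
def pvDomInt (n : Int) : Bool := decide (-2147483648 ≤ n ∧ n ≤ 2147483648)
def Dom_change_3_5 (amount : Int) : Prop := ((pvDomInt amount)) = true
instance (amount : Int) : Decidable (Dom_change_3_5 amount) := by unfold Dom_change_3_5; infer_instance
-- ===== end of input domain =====

-- B: closed-form base case from amount % 3 plus replicated 3s, instead of A's subtract-3 recursion (simpler; return value only).
-- ===== PORT A =====
-- `assert amount >= 8` raises for amount < 8: excluded by Pre_; the `amount < 8 => []` branch only makes the recursion total there.
def change_3_5 (amount : Int) : List Int :=
  if amount < 8 then []
  else if amount = 8 then [3, 5]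
  else if amount = 9 then [3, 3, 3]
  else if amount = 10 then [5, 5]
  else change_3_5 (amount - 3) ++ [3]
termination_by (amount - 7).toNat
decreasing_by omega

-- ===== PORT B =====
def change_3_5_alt (amount : Int) : List Int :=
  let r := PySem.Int.mod amount 3
  let p : List Int × Int :=
    if r = 2 then ([3, 5], 8)
    else if r = 0 then ([3, 3, 3], 9)
    else ([5, 5], 10)
  p.1 ++ List.replicate (PySem.Int.floordiv (amount - p.2) 3).toNat 3

-- ===== PRECONDITION & SPEC =====
-- Pre_ excludes amount < 8, where A's assert raises AssertionError.
def Pre_change_3_5 (amount : Int) : Prop := 8 ≤ amount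
instance (amount : Int) : Decidable (Pre_change_3_5 amount) := by unfold Pre_change_3_5; infer_instance
def pvWitness_change_3_5 : Int := (11)
def Spec_change_3_5 (amount : Int) (out : List Int) : Prop := out = change_3_5_alt amount
instance (amount : Int) (out : List Int) : Decidable (Spec_change_3_5 amount out) := by unfold Spec_change_3_5; infer_instance

-- ===== CLAIM (what is proved, stated in full; the proofs are below) =====
def Claim_equal_change_3_5 : Prop := ∀ (amount : Int), Dom_change_3_5 amount → Pre_change_3_5 amount → Spec_change_3_5 amount (change_3_5 amount)

-- ===== LEMMAS AND PROOFS =====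

-- ===== VERDICT (by name: the statement is the Claim_ definition above) =====
theorem alt_step (amount : Int) (h : 11 ≤ amount) :
    change_3_5_alt amount = change_3_5_alt (amount - 3) ++ [3] := by
  have h3 : (0:Int) < 3 := by norm_num
  simp only [change_3_5_alt, PySem.Int.mod_eq_emod_of_pos h3,
    PySem.Int.floordiv_eq_ediv_of_pos h3]
  have hm : (amount - 3) % 3 = amount % 3 := by omega
  rw [hm]
  by_cases h2 : amount % 3 = 2
  · norm_num [h2]
    have hc : ((amount - 8) / 3).toNat = ((amount - 3 - 8) / 3).toNat + 1 := by omega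
    rw [hc, List.replicate_succ']
  by_cases h0 : amount % 3 = 0
  · norm_num [h2, h0]
    have hc : ((amount - 9) / 3).toNat = ((amount - 3 - 9) / 3).toNat + 1 := by omega
    rw [hc, List.replicate_succ']
  · norm_num [h2, h0]
    have hc : ((amount - 10) / 3).toNat = ((amount - 3 - 10) / 3).toNat + 1 := by omega
    rw [hc, List.replicate_succ']

theorem equiv_ge8 (amount : Int) (h : 8 ≤ amount) :
    change_3_5 amount = change_3_5_alt amount := by
  have h3 : (0:Int) < 3 := by norm_num
  by_cases h8 : amount = 8
  · subst h8
    rw [change_3_5]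
    norm_num [change_3_5_alt, PySem.Int.mod_eq_emod_of_pos h3, PySem.Int.floordiv_eq_ediv_of_pos h3]
  by_cases h9 : amount = 9
  · subst h9
    rw [change_3_5]
    norm_num [change_3_5_alt, PySem.Int.mod_eq_emod_of_pos h3, PySem.Int.floordiv_eq_ediv_of_pos h3]
  by_cases h10 : amount = 10
  · subst h10
    rw [change_3_5]
    norm_num [change_3_5_alt, PySem.Int.mod_eq_emod_of_pos h3, PySem.Int.floordiv_eq_ediv_of_pos h3]
  · have h11 : 11 ≤ amount := by omega
    rw [change_3_5, alt_step amount h11]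
    simp only [if_neg (by omega : ¬ amount < 8), if_neg h8, if_neg h9, if_neg h10]
    rw [equiv_ge8 (amount - 3) (by omega)]
termination_by (amount - 7).toNat
decreasing_by omega

theorem change_3_5_spec : Claim_equal_change_3_5 := by
  intro amount _ hpre
  unfold Spec_change_3_5
  exact equiv_ge8 amount hpre
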